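-- pv_equiv track=rewrite | github.com/hiroTochigi/minutes-scraper | scraping/separate_public_communication/download_minutes.py | drop_empty_href_and_corresponding_name
-- ===== SOURCE A (Python) =====
-- def drop_empty_href_and_corresponding_name(file_name_and_file_path_set):
--
--     new_file_name_and_file_path_set = []
--     file_name_and_file_path = []
--     for index, text in enumerate(file_name_and_file_path_set):
--         if index%2 == 0:
--             file_name_and_file_path.append(text)
--         else:
--             if text.find("href=''")>0:
--                 file_name_and_file_path = []
--             else:
--                 file_name_and_file_path.append(text)
--                 new_file_name_and_file_path_set.append(file_name_and_file_path)
--                 file_name_and_file_path = []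
--     return new_file_name_and_file_path_set
-- ===== SOURCE B (Python) =====
-- def drop_empty_href_and_corresponding_name(file_name_and_file_path_set):
--     seq = file_name_and_file_path_set
--     kept = [i for i in range(1, len(seq), 2) if seq[i].find("href=''") <= 0]
--     return [[seq[i - 1], seq[i]] for i in kept]
-- ===== Notes on version B (the rewrite author's own statement) =====
-- stated objective: alternative
-- what changed: Replaces A's single enumerate pass with index-parity branching and a mutable pair buffer by two staged passes: first collect the odd index positions whose element passes the href test, then emit [seq[i-1], seq[i]] for those indices by index arithmetic.
import Mathlib
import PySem

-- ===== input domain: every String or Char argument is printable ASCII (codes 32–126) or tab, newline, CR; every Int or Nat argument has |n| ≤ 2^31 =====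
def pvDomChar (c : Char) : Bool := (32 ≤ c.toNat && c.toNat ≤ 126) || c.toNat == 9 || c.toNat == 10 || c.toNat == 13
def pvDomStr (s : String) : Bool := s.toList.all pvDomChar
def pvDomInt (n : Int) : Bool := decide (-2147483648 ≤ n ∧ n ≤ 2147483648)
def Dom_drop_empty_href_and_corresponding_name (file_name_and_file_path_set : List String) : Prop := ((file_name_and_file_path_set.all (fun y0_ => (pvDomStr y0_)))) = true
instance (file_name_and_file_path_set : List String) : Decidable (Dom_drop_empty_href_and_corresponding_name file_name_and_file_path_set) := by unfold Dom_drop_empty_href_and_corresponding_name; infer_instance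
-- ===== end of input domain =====

-- B replaces A's single pass with an index-parity test and a mutable buffer by two
-- staged passes over the odd index positions (collect kept indices, then emit the
-- pairs by index arithmetic); objective: alternative decomposition, same cost.

-- ===== PORT A =====
-- loop body of A (the enumerate-for-loop's state transformer)
def pvStepA (st : List (List String) × List String) (it : Int × String) :
    List (List String) × List String :=
  let acc := st.1
  let buf := st.2
  let index := it.1
  let text := it.2
  if PySem.Int.mod index 2 = 0 then
    (acc, buf ++ [text])
  else
    if PySem.Str.find text "href=''" > 0 then
      (acc, [])
    else
      (acc ++ [buf ++ [text]], [])

def drop_empty_href_and_corresponding_name (file_name_and_file_path_set : List String) : List (List String) :=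
  let st := (PySem.List.enumerate file_name_and_file_path_set 0).foldl pvStepA ([], [])
  st.1

-- ===== PORT B =====
-- Source B: kept = [i for i in range(1, len(seq), 2) if seq[i].find("href=''") <= 0];
--       return [[seq[i-1], seq[i]] for i in kept]
def drop_empty_href_and_corresponding_name_alt (file_name_and_file_path_set : List String) : List (List String) :=
  let seq := file_name_and_file_path_set
  let kept := (PySem.List.pyRange 1 (seq.length : Int) 2).filter
      (fun i => PySem.Str.find (PySem.List.pyGetD seq i "") "href=''" ≤ 0)
  kept.map (fun i => [PySem.List.pyGetD seq (i - 1) "", PySem.List.pyGetD seq i ""])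

-- ===== PRECONDITION & SPEC =====
def Spec_drop_empty_href_and_corresponding_name (file_name_and_file_path_set : List String) (out : List (List String)) : Prop := out = drop_empty_href_and_corresponding_name_alt file_name_and_file_path_set
instance (file_name_and_file_path_set : List String) (out : List (List String)) : Decidable (Spec_drop_empty_href_and_corresponding_name file_name_and_file_path_set out) := by unfold Spec_drop_empty_href_and_corresponding_name; infer_instance

-- ===== CLAIM (what is proved, stated in full; the proofs are below) =====
def Claim_equal_drop_empty_href_and_corresponding_name : Prop := ∀ (file_name_and_file_path_set : List String), Dom_drop_empty_href_and_corresponding_name file_name_and_file_path_set → Spec_drop_empty_href_and_corresponding_name file_name_and_file_path_set (drop_empty_href_and_corresponding_name file_name_and_file_path_set)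

-- ===== LEMMAS AND PROOFS =====

-- range(1, b, 2) peels its head when 1 < b
theorem pvRange2_cons (b : Int) (h : 1 < b) :
    PySem.List.pyRange 1 b 2 = 1 :: (PySem.List.pyRange 1 (b - 2) 2).map (· + 2) := by
  rw [PySem.List.pyRange_of_pos _ _ (by norm_num : (0:Int) < 2),
      PySem.List.pyRange_of_pos _ _ (by norm_num : (0:Int) < 2)]
  have hn : (if (1:Int) < b then ((b - 1 + 2 - 1) / 2).toNat else 0)
      = (if (1:Int) < b - 2 then ((b - 2 - 1 + 2 - 1) / 2).toNat else 0) + 1 := by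
    split_ifs <;> omega
  rw [hn, List.range_succ_eq_map]
  simp only [List.map_cons, List.map_map]
  congr 1

-- indexing steps through a cons for a nonnegative index
theorem pvGetD_cons_succ (x : String) (l : List String) (i : Int) (h : 0 ≤ i) (d : String) :
    PySem.List.pyGetD (x :: l) (i + 1) d = PySem.List.pyGetD l i d := by
  obtain ⟨n, rfl⟩ := Int.eq_ofNat_of_zero_le h
  rw [show ((n : Int) + 1) = ((n + 1 : Nat) : Int) by push_cast; ring,
      PySem.List.pyGetD_natCast, PySem.List.pyGetD_natCast]
  simp

-- range(1, n, 2) is empty for n ≤ 1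
theorem pvRange2_nil (b : Int) (h : b ≤ 1) : PySem.List.pyRange 1 b 2 = [] := by
  rw [PySem.List.pyRange_of_pos _ _ (by norm_num : (0:Int) < 2)]
  rw [if_neg (by omega)]
  simp

-- B unrolled on a full pair
theorem pvAltCons (a b : String) (rest : List String) :
    drop_empty_href_and_corresponding_name_alt (a :: b :: rest)
      = (if PySem.Str.find b "href=''" ≤ 0 then [[a, b]] else [])
        ++ drop_empty_href_and_corresponding_name_alt rest := by
  have pR : ∀ i ∈ PySem.List.pyRange 1 ((rest.length : Nat) : Int) 2, 1 ≤ i := by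
    intro i hi
    exact ((PySem.List.mem_pyRange_iff_of_pos (by norm_num) i).mp hi).1
  have hgs : ∀ (i : Int), 0 ≤ i → PySem.List.pyGetD (a :: b :: rest) (i + 2) "" = PySem.List.pyGetD rest i "" := by
    intro i hi
    rw [show (i + 2) = (i + 1) + 1 by ring, pvGetD_cons_succ _ _ _ (by omega), pvGetD_cons_succ _ _ _ hi]
  have hgs1 : ∀ (i : Int), 1 ≤ i → PySem.List.pyGetD (a :: b :: rest) (i + 2 - 1) "" = PySem.List.pyGetD rest (i - 1) "" := by
    intro i hi
    rw [show (i + 2 - 1) = (i - 1 + 1) + 1 by ring, pvGetD_cons_succ _ _ _ (by omega), pvGetD_cons_succ _ _ _ (by omega)]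
  have hb : PySem.List.pyGetD (a :: b :: rest) 1 "" = b := by
    have h := pvGetD_cons_succ a (b :: rest) 0 le_rfl ""
    norm_num at h ⊢
    simp_all
  have ha : PySem.List.pyGetD (a :: b :: rest) (1 - 1) "" = a := by
    norm_num [PySem.List.pyGetD_zero_cons]
  simp only [drop_empty_href_and_corresponding_name_alt]
  have hlen : (((a :: b :: rest).length : Nat) : Int) = (rest.length : Int) + 2 := by
    push_cast [List.length_cons]; ring
  rw [hlen, pvRange2_cons _ (by omega), show ((rest.length : Int) + 2 - 2) = ((rest.length : Nat) : Int) by ring]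
  rw [List.filter_cons]
  have hfilter :
      (((PySem.List.pyRange 1 ((rest.length : Nat) : Int) 2).map (· + 2)).filter
          (fun i => PySem.Str.find (PySem.List.pyGetD (a :: b :: rest) i "") "href=''" ≤ 0))
        = ((PySem.List.pyRange 1 ((rest.length : Nat) : Int) 2).filter
            (fun i => PySem.Str.find (PySem.List.pyGetD rest i "") "href=''" ≤ 0)).map (· + 2) := by
    rw [List.filter_map]
    congr 1
    apply List.filter_congr
    intro i hi
    simp only [Function.comp_apply]
    rw [hgs i (by have := pR i hi; omega)]
  have hmap : ∀ (l : List Int), (∀ i ∈ l, 1 ≤ i) →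
      ((l.map (· + 2)).map
          (fun i => [PySem.List.pyGetD (a :: b :: rest) (i - 1) "", PySem.List.pyGetD (a :: b :: rest) i ""]))
        = l.map (fun i => [PySem.List.pyGetD rest (i - 1) "", PySem.List.pyGetD rest i ""]) := by
    intro l hl
    rw [List.map_map]
    apply List.map_congr_left
    intro i hi
    simp only [Function.comp_apply]
    rw [show (i + 2 - 1) = (i + 2 - 1) by rfl, hgs1 i (hl i hi), hgs i (by have := hl i hi; omega)]
  rw [hb]
  by_cases hf : PySem.Str.find b "href=''" ≤ 0
  · rw [if_pos (by simpa using hf), if_pos hf]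
    simp only [List.map_cons]
    rw [ha, hb, hfilter, hmap _ (fun i hi => pR i (List.mem_of_mem_filter hi))]
    simp
  · rw [if_neg (by simpa using hf), if_neg hf]
    rw [hfilter, hmap _ (fun i hi => pR i (List.mem_of_mem_filter hi))]
    simp

theorem pvKey : ∀ (s : List String) (n : Nat) (acc : List (List String)),
    ((PySem.List.enumerate s (2 * (n : Int))).foldl pvStepA (acc, [])).1
    = acc ++ drop_empty_href_and_corresponding_name_alt s
  | [], n, acc => by
      simp [PySem.List.enumerate, drop_empty_href_and_corresponding_name_alt,
        pvRange2_nil (0 : Int) (by norm_num)]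
  | [a], n, acc => by
      simp [PySem.List.enumerate, drop_empty_href_and_corresponding_name_alt,
        pvRange2_nil (1 : Int) (by norm_num), pvStepA, PySem.Int.mod]
  | a :: b :: rest, n, acc => by
      have h0 : pvStepA (acc, []) (2 * (n : Int), a) = (acc, [a]) := by
        simp [pvStepA, PySem.Int.mod]
      have h1 : ¬ PySem.Int.mod (2 * (n : Int) + 1) 2 = 0 := by
        simp [PySem.Int.mod]
      have hidx : (2 * (n : Int) + 1 + 1) = 2 * ((n + 1 : Nat) : Int) := by push_cast; ring
      simp only [PySem.List.enumerate_cons, List.foldl_cons, h0, hidx]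
      by_cases hf : PySem.Str.find b "href=''" > 0
      · have h2 : pvStepA (acc, [a]) (2 * (n : Int) + 1, b) = (acc, []) := by
          simp only [pvStepA, if_neg h1, if_pos hf]
        rw [h2, pvKey rest (n + 1) acc, pvAltCons, if_neg (by omega)]
        simp
      · have h2 : pvStepA (acc, [a]) (2 * (n : Int) + 1, b) = (acc ++ [[a, b]], []) := by
          simp only [pvStepA, if_neg h1, if_neg hf]
          simp
        rw [h2, pvKey rest (n + 1) (acc ++ [[a, b]]), pvAltCons, if_pos (by omega)]
        simp

-- ===== VERDICT (by name: the statement is the Claim_ definition above) =====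
theorem drop_empty_href_and_corresponding_name_spec : Claim_equal_drop_empty_href_and_corresponding_name := by
  intro s _
  unfold Spec_drop_empty_href_and_corresponding_name drop_empty_href_and_corresponding_name
  have := pvKey s 0 []
  simpa using this
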